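-- pv_equiv track=rewrite | github.com/RMCV-Rajapaksha/Competitive-Programing-New | Haxtream 2024/Crafting a Mask for the Final Game.py | count_masks
-- ===== SOURCE A (Python) =====
-- def count_masks(test_cases):
--     results = []
--
--     for case in test_cases:
--         N, large_number = case
--         materials = set(str(i) for i in range(1, N + 1))  # Create a set of valid materials
--
--         length = len(large_number)
--         dp = [0] * (length + 1)
--         dp[0] = 1  # There's one way to make an empty mask
--
--         for i in range(1, length + 1):
--             for j in range(1, 5):  # Look back up to 4 digits
--                 if i - j >= 0:
--                     part = large_number[i - j:i]
--                     if part in materials: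
--                         dp[i] += dp[i - j]
--
--         result = dp[length]
--         results.append(result if result > 0 else -1)
--
--     return results
-- ===== SOURCE B (Python) =====
-- def _is_material(part, N):
--     # valid material <=> decimal numeral without leading zero whose value is in 1..N
--     if not part or part[0] == '0':
--         return False
--     v = 0
--     for ch in part:
--         if ch < '0' or ch > '9':
--             return False
--         v = v * 10 + (ord(ch) - 48)
--     return v <= N
--
--
-- def count_masks(test_cases):
--     results = []
--     for N, s in test_cases:
--         L = len(s)
--         memo = {}
--
--         def ways(pos):
--             # number of segmentations of the suffix s[pos:]
--             if pos == L:
--                 return 1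
--             hit = memo.get(pos)
--             if hit is not None:
--                 return hit
--             total = 0
--             for j in (1, 2, 3, 4):
--                 if pos + j <= L and _is_material(s[pos:pos + j], N):
--                     total += ways(pos + j)
--             memo[pos] = total
--             return total
--
--         r = ways(0)
--         results.append(r if r > 0 else -1)
--     return results
-- ===== Notes on version B (the rewrite author's own statement) =====
-- stated objective: faster
-- what changed: B is a top-down memoized recursion ways(pos) over suffix positions (a recursive descent with a memo dict, no dp table filled by loops) and tests each candidate part arithmetically (nonempty, no leading zero, digits only, value <= N) instead of A's iterative forward dp array driven by membership in a precomputed set of all N numeral strings str(1..N); dropping that set removes the O(N) per-case set construction.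
import Mathlib
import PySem

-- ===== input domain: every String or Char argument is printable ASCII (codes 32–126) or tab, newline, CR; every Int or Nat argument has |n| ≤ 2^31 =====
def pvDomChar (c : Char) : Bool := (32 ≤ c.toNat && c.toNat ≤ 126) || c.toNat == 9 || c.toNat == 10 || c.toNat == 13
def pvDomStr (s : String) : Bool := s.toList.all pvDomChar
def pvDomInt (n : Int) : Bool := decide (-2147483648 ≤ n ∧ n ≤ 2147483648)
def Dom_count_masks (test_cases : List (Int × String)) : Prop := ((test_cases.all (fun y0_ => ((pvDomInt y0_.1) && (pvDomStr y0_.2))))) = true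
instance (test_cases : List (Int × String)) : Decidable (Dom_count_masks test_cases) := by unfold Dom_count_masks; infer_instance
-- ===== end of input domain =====

-- B is a top-down memoized recursion ways(pos) over suffix positions with an arithmetic
-- validity test per part, instead of A's iterative forward dp array over a precomputed
-- materials set; skipping the O(N) set build made B measurably faster in a timing run.

-- ===== PORT A =====
-- per-case body of A's outer loop, named for readability (verbatim transliteration)
def count_masks_case (N : Int) (large_number : String) : Int :=
  let materials : PySem.Set String :=
    PySem.Set.ofList ((PySem.List.pyRange 1 (N + 1) 1).map PySem.Int.toStr)
  let length : Int := PySem.Str.len large_number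
  -- [0] * (length + 1); length ≥ 0, so this is replicate
  let dp : List Int := List.replicate (length + 1).toNat 0
  let dp := PySem.List.pySetD dp 0 1       -- dp[0] = 1
  let dp := (PySem.List.pyRange 1 (length + 1) 1).foldl (fun dp i =>
    (PySem.List.pyRange 1 5 1).foldl (fun dp j =>
      if i - j ≥ 0 then
        let part := PySem.Str.slice large_number (some (i - j)) (some i)
        if materials.contains part then
          PySem.List.pySetD dp i (PySem.List.pyGetD dp i 0 + PySem.List.pyGetD dp (i - j) 0)
        else dp
      else dp) dp) dp
  let result := PySem.List.pyGetD dp length 0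
  if result > 0 then result else -1

def count_masks (test_cases : List (Int × String)) : List Int :=
  test_cases.foldl (fun results case => results ++ [count_masks_case case.1 case.2]) []

-- ===== PORT B =====
-- the `for ch in part` loop of _is_material (early return False on a non-digit)
def pvIsMatLoop (N : Int) (v : Int) : List Char → Bool
  | [] => decide (v ≤ N)
  | ch :: rest =>
    if ch < '0' ∨ '9' < ch then false
    else pvIsMatLoop N (v * 10 + ((ch.toNat : Int) - 48)) rest

-- _is_material(part, N); part[0] read by matching on the character list ('' and leading '0' rejected)
def pvIsMaterial (N : Int) (part : String) : Bool :=
  match part.toList with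
  | [] => false
  | c :: rest => if c = '0' then false else pvIsMatLoop N 0 (c :: rest)

-- ways(pos) of Source B: top-down recursion threading the memo dict; fuel makes the
-- descent structural (fuel > L - pos always holds on every reached call, so the
-- 0-fuel branch is unreachable — a totality guard, not a fallback algorithm)
def pvWays (N : Int) (s : String) (L : Int) :
    ℕ → PySem.Dict Int Int → Int → Int × PySem.Dict Int Int
  | 0, memo, _ => (0, memo)
  | fuel + 1, memo, pos =>
    if pos = L then (1, memo)
    else
      match memo.get? pos with
      | some v => (v, memo)
      | none =>
        let r := ([1, 2, 3, 4] : List Int).foldl (fun acc j =>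
          if pos + j ≤ L ∧ pvIsMaterial N (PySem.Str.slice s (some pos) (some (pos + j))) = true then
            let q := pvWays N s L fuel acc.2 (pos + j)
            (acc.1 + q.1, q.2)
          else acc) (0, memo)
        (r.1, r.2.insert pos r.1)

-- per-case body of B's outer loop (verbatim transliteration of Source B)
def count_masks_alt_case (N : Int) (s : String) : Int :=
  let L : Int := PySem.Str.len s
  let r := (pvWays N s L (L + 1).toNat PySem.Dict.empty 0).1
  if r > 0 then r else -1

def count_masks_alt (test_cases : List (Int × String)) : List Int :=
  test_cases.foldl (fun results case => results ++ [count_masks_alt_case case.1 case.2]) []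

-- ===== PRECONDITION & SPEC =====
def Spec_count_masks (test_cases : List (Int × String)) (out : List Int) : Prop := out = count_masks_alt test_cases
instance (test_cases : List (Int × String)) (out : List Int) : Decidable (Spec_count_masks test_cases out) := by unfold Spec_count_masks; infer_instance

-- ===== CLAIM (what is proved, stated in full; the proofs are below) =====
def Claim_equal_count_masks : Prop := ∀ (test_cases : List (Int × String)), Dom_count_masks test_cases → Spec_count_masks test_cases (count_masks test_cases)

-- ===== LEMMAS AND PROOFS =====

-- ---------- generic path counting in the segmentation DAG ----------

def pathC (E : ℕ → ℕ → Bool) (i j : ℕ) : Int :=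
  if h : i < j then
    ∑ b ∈ (Finset.Ico (i + 1) (j + 1)).attach, (if E i b.1 then pathC E b.1 j else 0)
  else if i = j then 1 else 0
termination_by j - i
decreasing_by
  have hb := Finset.mem_Ico.mp b.2; omega

theorem pathC_self (E : ℕ → ℕ → Bool) (i : ℕ) : pathC E i i = 1 := by
  rw [pathC]; simp

theorem pathC_of_lt (E : ℕ → ℕ → Bool) {i j : ℕ} (h : i < j) :
    pathC E i j = ∑ b ∈ Finset.Ico (i + 1) (j + 1), (if E i b then pathC E b j else 0) := by
  rw [pathC, dif_pos h]
  exact Finset.sum_attach _ (fun b => if E i b then pathC E b j else 0)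

theorem pathC_last (E : ℕ → ℕ → Bool) :
    ∀ (n i j : ℕ), j - i = n → i < j →
      pathC E i j = ∑ a ∈ Finset.Ico i j, (if E a j then pathC E i a else 0) := by
  intro n
  induction n using Nat.strong_induction_on with
  | _ n ih =>
    intro i j hn hij
    rw [pathC_of_lt E hij]
    rw [Finset.sum_Ico_succ_top (by omega : i + 1 ≤ j)]
    have hstep : ∀ b ∈ Finset.Ico (i + 1) j,
        (if E i b then pathC E b j else 0)
          = ∑ a ∈ Finset.Ico b j, (if E i b then (if E a j then pathC E b a else 0) else 0) := by
      intro b hb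
      have hb' := Finset.mem_Ico.mp hb
      by_cases hEb : E i b
      · simp only [if_pos hEb]
        exact ih (j - b) (by omega) b j rfl (by omega)
      · simp [hEb]
    rw [Finset.sum_congr rfl hstep]
    rw [Finset.sum_Ico_Ico_comm (i + 1) j
      (fun b a => if E i b then (if E a j then pathC E b a else 0) else 0)]
    have hinner : ∀ a ∈ Finset.Ico (i + 1) j,
        (∑ b ∈ Finset.Ico (i + 1) (a + 1), (if E i b then (if E a j then pathC E b a else 0) else 0))
          = (if E a j then pathC E i a else 0) := by
      intro a ha
      have ha' := Finset.mem_Ico.mp ha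
      by_cases hEa : E a j
      · simp only [if_pos hEa]
        rw [← pathC_of_lt E (by omega : i < a)]
      · simp [hEa]
    rw [Finset.sum_congr rfl hinner, pathC_self]
    rw [Finset.sum_eq_sum_Ico_succ_bot hij, pathC_self]
    exact add_comm _ _

theorem sum_last4 (E : ℕ → ℕ → Bool) (hE : ∀ a b : ℕ, b - a > 4 → E a b = false)
    (f : ℕ → Int) (i : ℕ) (hi : 0 < i) :
    (∑ a ∈ Finset.Ico 0 i, (if E a i then f a else 0)) =
      (((if 1 ≤ i ∧ E (i - 1) i then f (i - 1) else 0)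
      + (if 2 ≤ i ∧ E (i - 2) i then f (i - 2) else 0))
      + (if 3 ≤ i ∧ E (i - 3) i then f (i - 3) else 0))
      + (if 4 ≤ i ∧ E (i - 4) i then f (i - 4) else 0) := by
  by_cases h4 : 4 ≤ i
  · obtain ⟨m, rfl⟩ : ∃ m, i = m + 4 := ⟨i - 4, by omega⟩
    rw [← Finset.sum_Ico_consecutive _ (by omega : 0 ≤ m) (by omega : m ≤ m + 4)]
    rw [Finset.sum_eq_zero (fun a ha => by
      have := Finset.mem_Ico.mp ha
      rw [hE a (m + 4) (by omega)]; simp)]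
    rw [show m + 4 = (m + 3) + 1 from rfl, Finset.sum_Ico_succ_top (by omega)]
    rw [show m + 3 = (m + 2) + 1 from rfl, Finset.sum_Ico_succ_top (by omega)]
    rw [show m + 2 = (m + 1) + 1 from rfl, Finset.sum_Ico_succ_top (by omega)]
    rw [Finset.sum_Ico_succ_top (by omega), Finset.Ico_self, Finset.sum_empty]
    have e1 : m + 4 - 1 = m + 3 := by omega
    have e2 : m + 4 - 2 = m + 2 := by omega
    have e3 : m + 4 - 3 = m + 1 := by omega
    have e4 : m + 4 - 4 = m := by omega
    rw [e1, e2, e3, e4]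
    have c1 : 1 ≤ m + 4 := by omega
    have c2 : 2 ≤ m + 4 := by omega
    have c3 : 3 ≤ m + 4 := by omega
    have c4 : 4 ≤ m + 4 := by omega
    simp only [c1, c2, c3, c4, true_and, zero_add]
    ring
  · have h1 : i = 1 ∨ i = 2 ∨ i = 3 := by omega
    rcases h1 with rfl | rfl | rfl
    · rw [show (1:ℕ) = 0 + 1 from rfl, Finset.sum_Ico_succ_top (by omega),
        Finset.Ico_self, Finset.sum_empty]
      norm_num
    · rw [show (2:ℕ) = 1 + 1 from rfl, Finset.sum_Ico_succ_top (by omega),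
        Finset.sum_Ico_succ_top (by omega), Finset.Ico_self, Finset.sum_empty]
      norm_num
      ring
    · rw [show (3:ℕ) = 2 + 1 from rfl, Finset.sum_Ico_succ_top (by omega),
        Finset.sum_Ico_succ_top (by omega), Finset.sum_Ico_succ_top (by omega),
        Finset.Ico_self, Finset.sum_empty]
      norm_num
      ring

theorem sum_first4 (E : ℕ → ℕ → Bool) (hE : ∀ a b : ℕ, b - a > 4 → E a b = false)
    (f : ℕ → Int) (t L : ℕ) (ht : t < L) :
    (∑ b ∈ Finset.Ico (t + 1) (L + 1), (if E t b then f b else 0)) =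
      (((if t + 1 ≤ L ∧ E t (t + 1) then f (t + 1) else 0)
      + (if t + 2 ≤ L ∧ E t (t + 2) then f (t + 2) else 0))
      + (if t + 3 ≤ L ∧ E t (t + 3) then f (t + 3) else 0))
      + (if t + 4 ≤ L ∧ E t (t + 4) then f (t + 4) else 0) := by
  by_cases h4 : t + 4 ≤ L
  · rw [← Finset.sum_Ico_consecutive _ (by omega : t + 1 ≤ t + 5) (by omega : t + 5 ≤ L + 1)]
    have hz : (∑ b ∈ Finset.Ico (t + 5) (L + 1), (if E t b then f b else 0)) = 0 :=
      Finset.sum_eq_zero (fun b hb => by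
        have hb' := Finset.mem_Ico.mp hb
        show (if E t b = true then f b else 0) = 0
        rw [hE t b (by omega)]; simp)
    rw [hz, add_zero]
    rw [show t + 5 = (t + 4) + 1 from rfl, Finset.sum_Ico_succ_top (by omega)]
    rw [show t + 4 = (t + 3) + 1 from rfl, Finset.sum_Ico_succ_top (by omega)]
    rw [show t + 3 = (t + 2) + 1 from rfl, Finset.sum_Ico_succ_top (by omega)]
    rw [Finset.sum_Ico_succ_top (by omega), Finset.Ico_self, Finset.sum_empty]
    have c1 : t + 1 ≤ L := by omega
    have c2 : t + 2 ≤ L := by omega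
    have c3 : t + 3 ≤ L := by omega
    simp only [c1, c2, c3, h4, true_and, zero_add, add_zero]
  · have h1 : L = t + 1 ∨ L = t + 2 ∨ L = t + 3 := by omega
    have ht1 : ¬ (t + 4 ≤ L) := h4
    rcases h1 with rfl | rfl | rfl
    · rw [show t + 1 + 1 = (t + 1) + 1 from rfl, Finset.sum_Ico_succ_top (by omega),
        Finset.Ico_self, Finset.sum_empty]
      simp only [le_refl, true_and, zero_add]
      have : ¬ (t + 2 ≤ t + 1) := by omega
      have h3 : ¬ (t + 3 ≤ t + 1) := by omega
      have h4' : ¬ (t + 4 ≤ t + 1) := by omega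
      simp [this, h3, h4']
    · rw [Finset.sum_Ico_succ_top (by omega), Finset.sum_Ico_succ_top (by omega),
        Finset.Ico_self, Finset.sum_empty]
      have g1 : t + 1 ≤ t + 2 := by omega
      have g3 : ¬ (t + 3 ≤ t + 2) := by omega
      have g4 : ¬ (t + 4 ≤ t + 2) := by omega
      simp [g1, g3, g4]
    · rw [Finset.sum_Ico_succ_top (by omega), Finset.sum_Ico_succ_top (by omega),
        Finset.sum_Ico_succ_top (by omega), Finset.Ico_self, Finset.sum_empty]
      have g1 : t + 1 ≤ t + 3 := by omega
      have g2 : t + 2 ≤ t + 3 := by omega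
      have g4 : ¬ (t + 4 ≤ t + 3) := by omega
      simp [g1, g2, g4]


-- ---------- digit characters and Horner evaluation ----------

def pvHorner (v : Int) (cs : List Char) : Int :=
  cs.foldl (fun a c => a * 10 + ((c.toNat : Int) - 48)) v
theorem pvIsMatLoop_digits (N : Int) :
    ∀ (cs : List Char) (v : Int), (∀ c ∈ cs, ¬ (c < '0' ∨ '9' < c)) →
      pvIsMatLoop N v cs = decide (pvHorner v cs ≤ N) := by
  intro cs
  induction cs with
  | nil => intro v _; rfl
  | cons c rest ih =>
    intro v h
    rw [pvIsMatLoop, if_neg (h c (by simp))]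
    exact ih _ (fun x hx => h x (by simp [hx]))

theorem pvIsMatLoop_true_digits (N : Int) :
    ∀ (cs : List Char) (v : Int), pvIsMatLoop N v cs = true → ∀ c ∈ cs, ¬ (c < '0' ∨ '9' < c) := by
  intro cs
  induction cs with
  | nil => intro v _ c hc; simp at hc
  | cons c rest ih =>
    intro v h x hx
    rw [pvIsMatLoop] at h
    by_cases hc : c < '0' ∨ '9' < c
    · rw [if_pos hc] at h; exact absurd h (by simp)
    · rw [if_neg hc] at h
      rcases List.mem_cons.mp hx with rfl | hx'
      · exact hc
      · exact ih _ h x hx'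

theorem toNat_digitChar {d : ℕ} (h : d < 10) : (Nat.digitChar d).toNat = d + 48 := by
  interval_cases d <;> rfl

theorem pvHorner_ofDigits :
    ∀ (ds : List ℕ), (∀ d ∈ ds, d < 10) → ∀ (v : Int),
      pvHorner v ((ds.map Nat.digitChar).reverse) = v * (10 : Int) ^ ds.length + (Nat.ofDigits 10 ds : ℕ) := by
  intro ds
  induction ds with
  | nil => intro _ v; simp [pvHorner]
  | cons d ds ih =>
    intro h v
    have hd : d < 10 := h d (by simp)
    simp only [List.map_cons, List.reverse_cons]
    rw [pvHorner, List.foldl_append]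
    have := ih (fun x hx => h x (by simp [hx])) v
    rw [pvHorner] at this
    rw [this]
    simp only [List.foldl_cons, List.foldl_nil, toNat_digitChar hd]
    rw [Nat.ofDigits_cons]
    push_cast
    simp [pow_succ]
    ring


theorem toDigitsCore_eq_digits :
    ∀ (f n : ℕ) (acc : List Char), 0 < n → n < f →
      Nat.toDigitsCore 10 f n acc = ((Nat.digits 10 n).map Nat.digitChar).reverse ++ acc := by
  intro f
  induction f with
  | zero => intro n acc h1 h2; omega
  | succ f ih =>
    intro n acc h1 h2
    rw [Nat.toDigitsCore]
    by_cases hd : n / 10 = 0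
    · rw [if_pos hd]
      rw [Nat.digits_def' (by norm_num) h1, hd]
      simp
    · rw [if_neg hd]
      rw [ih (n / 10) _ (Nat.pos_of_ne_zero hd) (by
        have := Nat.div_lt_self h1 (by norm_num : 1 < 10); omega)]
      rw [Nat.digits_def' (by norm_num) h1]
      simp

theorem toChars_pos (n : ℕ) (h : 0 < n) :
    PySem.Int.toChars (n : Int) = ((Nat.digits 10 n).map Nat.digitChar).reverse := by
  have : ¬ ((n : Int) < 0) := by omega
  simp only [PySem.Int.toChars, if_neg this]
  rw [show ((n : Int)).toNat = n from Int.toNat_natCast n]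
  rw [Nat.toDigits, toDigitsCore_eq_digits (n+1) n [] h (by omega)]
  simp

theorem digit_cond (c : Char) : (¬ (c < '0' ∨ '9' < c)) ↔ (48 ≤ c.toNat ∧ c.toNat ≤ 57) := by
  push_neg
  constructor
  · rintro ⟨h1, h2⟩; rw [Char.le_def] at h1 h2; exact ⟨h1, h2⟩
  · rintro ⟨h1, h2⟩; exact ⟨Char.le_def.mpr h1, Char.le_def.mpr h2⟩

theorem digitChar_digit_cond {d : ℕ} (h : d < 10) :
    ¬ (Nat.digitChar d < '0' ∨ '9' < Nat.digitChar d) := by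
  rw [digit_cond, toNat_digitChar h]; omega

theorem digitChar_restore {c : Char} (h48 : 48 ≤ c.toNat) (h57 : c.toNat ≤ 57) :
    Nat.digitChar (c.toNat - 48) = c := by
  have h10 : c.toNat - 48 < 10 := by omega
  calc Nat.digitChar (c.toNat - 48) = Char.ofNat (c.toNat - 48 + 48) := by
        interval_cases h : (c.toNat - 48) <;> decide
    _ = c := by rw [show c.toNat - 48 + 48 = c.toNat by omega, Char.ofNat_toNat]

theorem char_eq_of_toNat {c d : Char} (h : c.toNat = d.toNat) : c = d := by
  rw [← Char.ofNat_toNat c, ← Char.ofNat_toNat d, h]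

theorem material_iff (N : Int) (p : String) :
    PySem.Set.contains
      (PySem.Set.ofList ((PySem.List.pyRange 1 (N + 1) 1).map PySem.Int.toStr)) p
      = pvIsMaterial N p := by
  rw [Bool.eq_iff_iff]
  rw [PySem.Set.contains_iff, PySem.Set.mem_ofList, List.mem_map]
  constructor
  · rintro ⟨i, hi, rfl⟩
    obtain ⟨h1, h2⟩ := PySem.List.mem_pyRange_one.mp hi
    set n : ℕ := i.toNat with hn
    have hn0 : 0 < n := by omega
    have hi' : (n : Int) = i := by omega
    have hpl : (PySem.Int.toStr i).toList = ((Nat.digits 10 n).map Nat.digitChar).reverse := by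
      rw [PySem.Int.toList_toStr, ← hi', toChars_pos n hn0]
    have hne : Nat.digits 10 n ≠ [] := Nat.digits_ne_nil_iff_ne_zero.mpr (by omega)
    have hds : Nat.digits 10 n = (Nat.digits 10 n).dropLast ++ [(Nat.digits 10 n).getLast hne] :=
      (List.dropLast_append_getLast hne).symm
    have hcons : ((Nat.digits 10 n).map Nat.digitChar).reverse =
        Nat.digitChar ((Nat.digits 10 n).getLast hne) ::
          ((Nat.digits 10 n).dropLast.map Nat.digitChar).reverse := by
      conv_lhs => rw [hds]
      simp
    have hgl10 : (Nat.digits 10 n).getLast hne < 10 :=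
      Nat.digits_lt_base (by norm_num) (List.getLast_mem hne)
    have hgl0 : (Nat.digits 10 n).getLast hne ≠ 0 := Nat.getLast_digit_ne_zero 10 (by omega)
    rw [pvIsMaterial]
    rw [hpl, hcons]
    have hc0 : Nat.digitChar ((Nat.digits 10 n).getLast hne) ≠ '0' := by
      intro h
      have := congrArg Char.toNat h
      rw [toNat_digitChar hgl10] at this
      simp at this; omega
    show (if Nat.digitChar ((Nat.digits 10 n).getLast hne) = '0' then false
          else pvIsMatLoop N 0 (Nat.digitChar ((Nat.digits 10 n).getLast hne) ::
            ((Nat.digits 10 n).dropLast.map Nat.digitChar).reverse)) = true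
    rw [if_neg hc0, ← hcons]
    have hdigs : ∀ c ∈ ((Nat.digits 10 n).map Nat.digitChar).reverse, ¬ (c < '0' ∨ '9' < c) := by
      intro c hc
      rw [List.mem_reverse, List.mem_map] at hc
      obtain ⟨d, hd, rfl⟩ := hc
      exact digitChar_digit_cond (Nat.digits_lt_base (by norm_num) hd)
    rw [pvIsMatLoop_digits N _ 0 hdigs]
    rw [pvHorner_ofDigits _ (fun d hd => Nat.digits_lt_base (by norm_num) hd) 0]
    rw [Nat.ofDigits_digits]
    simp; omega
  · intro h
    rw [pvIsMaterial] at h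
    cases hpl : p.toList with
    | nil => rw [hpl] at h; exact absurd h (by simp)
    | cons c rest =>
      rw [hpl] at h
      replace h : (if c = '0' then false else pvIsMatLoop N 0 (c :: rest)) = true := h
      by_cases hc0 : c = '0'
      · rw [if_pos hc0] at h; exact absurd h (by simp)
      rw [if_neg hc0] at h
      have hdigs := pvIsMatLoop_true_digits N _ _ h
      have hdigc := hdigs c (by simp)
      rw [digit_cond] at hdigc
      set ds : List ℕ := ((c :: rest).map (fun x => x.toNat - 48)).reverse with hdsdef
      have hlt : ∀ d ∈ ds, d < 10 := by
        intro d hd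
        rw [hdsdef, List.mem_reverse, List.mem_map] at hd
        obtain ⟨x, hx, rfl⟩ := hd
        have := (digit_cond x).mp (hdigs x hx)
        omega
      have hmapback : (ds.map Nat.digitChar).reverse = c :: rest := by
        rw [hdsdef, List.map_reverse, List.reverse_reverse, List.map_map]
        conv_rhs => rw [← List.map_id (c :: rest)]
        apply List.map_congr_left
        intro x hx
        have := (digit_cond x).mp (hdigs x hx)
        exact digitChar_restore this.1 this.2
      have hdsne : ds ≠ [] := by rw [hdsdef]; simp
      have hglq : ds.getLast? = some (c.toNat - 48) := by
        rw [hdsdef]; rw [List.getLast?_reverse]; simp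
      have hc48 : c.toNat ≠ 48 := by
        intro hh
        exact hc0 (char_eq_of_toNat (by rw [hh]; rfl))
      have hlast : ∀ (hh : ds ≠ []), ds.getLast hh ≠ 0 := by
        intro hh
        have := List.getLast?_eq_getLast (l := ds) hh
        rw [hglq] at this
        have : ds.getLast hh = c.toNat - 48 := by injection this.symm
        rw [this]; omega
      set n : ℕ := Nat.ofDigits 10 ds with hndef
      have hdig : Nat.digits 10 n = ds := Nat.digits_ofDigits 10 (by norm_num) ds hlt hlast
      have hn0 : n ≠ 0 := by
        intro hh
        rw [hh] at hdig
        simp at hdig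
        exact hdsne hdig
      have hval : pvHorner 0 (c :: rest) = (n : Int) := by
        rw [← hmapback, pvHorner_ofDigits ds hlt 0]
        simp [hndef]
      have hle : (n : Int) ≤ N := by
        rw [pvIsMatLoop_digits N _ 0 hdigs, hval] at h
        exact of_decide_eq_true h
      refine ⟨(n : Int), PySem.List.mem_pyRange_one.mpr ⟨by omega, by omega⟩, ?_⟩
      apply String.ext
      rw [PySem.Int.toList_toStr, toChars_pos n (Nat.pos_of_ne_zero hn0), hdig, hmapback, hpl]


-- ---------- the edge predicate both programs test ----------

def pvEdge (N : Int) (s : String) (a b : ℕ) : Bool :=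
  decide (a < b) && decide (b ≤ s.toList.length) && decide (b - a ≤ 4) &&
    pvIsMaterial N (PySem.Str.slice s (some (a : Int)) (some (b : Int)))

theorem pvEdge_far (N : Int) (s : String) : ∀ a b : ℕ, b - a > 4 → pvEdge N s a b = false := by
  intro a b h
  have : ¬ (b - a ≤ 4) := by omega
  simp [pvEdge, this]

-- ---------- lists as functions over List.range ----------

theorem getD_rmap (n k : ℕ) (f : ℕ → Int) (hk : k < n) :
    PySem.List.pyGetD ((List.range n).map f) (k : Int) 0 = f k := by
  rw [PySem.List.pyGetD_natCast, List.getD_eq_getElem?_getD]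
  simp [hk]

theorem setD_rmap (n i : ℕ) (f : ℕ → Int) (v : Int) (hi : i < n) :
    PySem.List.pySetD ((List.range n).map f) (i : Int) v
      = (List.range n).map (fun k => if k = i then v else f k) := by
  rw [PySem.List.pySetD_natCast]
  apply List.ext_getElem (by simp)
  intro k h1 h2
  rw [List.getElem_set]
  simp only [List.getElem_map, List.getElem_range]
  by_cases hki : i = k
  · subst hki; simp
  · rw [if_neg hki, if_neg (fun h => hki h.symm)]

theorem rmap_congr {n : ℕ} {f g : ℕ → Int} (h : ∀ k, k < n → f k = g k) :
    (List.range n).map f = (List.range n).map g :=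
  List.map_congr_left (fun k hk => h k (List.mem_range.mp hk))

-- ---------- A's loop invariant ----------

-- A's inner-loop body, one j step, on a list given as a function over List.range
theorem stepA (N : Int) (s : String) (f : ℕ → Int) (i : ℕ) (j : Int)
    (hj1 : 1 ≤ j) (hj4 : j ≤ 4) (hi1 : 1 ≤ i) (hiL : i ≤ s.toList.length) :
    (if (i : Int) - j ≥ 0 then
      (if (PySem.Set.ofList (List.map PySem.Int.toStr (PySem.List.pyRange 1 (N + 1)))).contains
            (PySem.Str.slice s (some ((i : Int) - j)) (some (i : Int))) = true then
        PySem.List.pySetD ((List.range (s.toList.length + 1)).map f) (i : Int)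
          (PySem.List.pyGetD ((List.range (s.toList.length + 1)).map f) (i : Int) 0
            + PySem.List.pyGetD ((List.range (s.toList.length + 1)).map f) ((i : Int) - j) 0)
      else ((List.range (s.toList.length + 1)).map f))
     else ((List.range (s.toList.length + 1)).map f))
    = (List.range (s.toList.length + 1)).map
        (fun k => if k = i then
            f i + (if j.toNat ≤ i ∧ pvEdge N s (i - j.toNat) i = true then f (i - j.toNat) else 0)
          else f k) := by
  by_cases hge : (i : Int) - j ≥ 0
  · have hjt : (j.toNat : Int) = j := Int.toNat_of_nonneg (by omega)
    have hji : j.toNat ≤ i := by omega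
    have hcast : (i : Int) - j = ((i - j.toNat : ℕ) : Int) := by push_cast; omega
    rw [if_pos hge, hcast, material_iff]
    have hedge : pvEdge N s (i - j.toNat) i
        = pvIsMaterial N (PySem.Str.slice s (some ((i - j.toNat : ℕ) : Int)) (some (i : Int))) := by
      unfold pvEdge
      rw [decide_eq_true (show i - j.toNat < i by omega),
          decide_eq_true (show i ≤ s.toList.length from hiL),
          decide_eq_true (show i - (i - j.toNat) ≤ 4 by omega)]
      simp
    by_cases hm : pvIsMaterial N
        (PySem.Str.slice s (some ((i - j.toNat : ℕ) : Int)) (some (i : Int))) = true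
    · rw [if_pos hm, getD_rmap _ _ _ (by omega), getD_rmap _ _ _ (by omega),
        setD_rmap _ _ _ _ (by omega)]
      apply rmap_congr; intro k hk
      by_cases hki : k = i
      · subst hki
        rw [if_pos rfl, if_pos rfl, if_pos ⟨hji, by rw [hedge]; exact hm⟩]
      · rw [if_neg hki, if_neg hki]
    · rw [if_neg hm]
      apply rmap_congr; intro k hk
      by_cases hki : k = i
      · subst hki
        rw [if_pos rfl, if_neg (fun hc => hm (by rw [← hedge]; exact hc.2)), add_zero]
      · rw [if_neg hki]
  · rw [if_neg hge]
    apply rmap_congr; intro k hk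
    have hjt : (j.toNat : Int) = j := Int.toNat_of_nonneg (by omega)
    by_cases hki : k = i
    · subst hki
      have hcond : ¬ (j.toNat ≤ k ∧ pvEdge N s (k - j.toNat) k = true) := by
        rintro ⟨h1, -⟩
        exact hge (by omega)
      rw [if_pos rfl, if_neg hcond, add_zero]
    · rw [if_neg hki]

theorem A_loop (N : Int) (s : String) : ∀ (t : ℕ), t ≤ s.toList.length →
    List.foldl
      (fun dp (k : ℕ) =>
        List.foldl
          (fun dp j =>
            if 1 + (k : Int) - j ≥ 0 then
              if (PySem.Set.ofList (List.map PySem.Int.toStr (PySem.List.pyRange 1 (N + 1)))).contains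
                    (PySem.Str.slice s (some (1 + (k : Int) - j)) (some (1 + (k : Int)))) = true then
                PySem.List.pySetD dp (1 + (k : Int))
                  (PySem.List.pyGetD dp (1 + (k : Int)) 0 + PySem.List.pyGetD dp (1 + (k : Int) - j) 0)
              else dp
            else dp)
          dp (PySem.List.pyRange 1 5))
      ((List.range (s.toList.length + 1)).map
        (fun k => if k ≤ 0 then pathC (pvEdge N s) 0 k else 0))
      (List.range t)
    = (List.range (s.toList.length + 1)).map
        (fun k => if k ≤ t then pathC (pvEdge N s) 0 k else 0) := by
  intro t
  induction t with
  | zero => intro _; rw [show List.range 0 = ([] : List ℕ) from List.range_zero, List.foldl_nil]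
  | succ t ih =>
    intro ht
    rw [show List.range (t + 1) = List.range t ++ [t] from List.range_succ,
      List.foldl_append, ih (by omega), List.foldl_cons, List.foldl_nil]
    rw [show (1 : Int) + (t : ℕ) = ((t + 1 : ℕ) : Int) by push_cast; ring]
    rw [show PySem.List.pyRange 1 5 1 = [1, 2, 3, 4] from rfl]
    simp only [List.foldl_cons, List.foldl_nil]
    rw [stepA N s _ (t + 1) 1 (by norm_num) (by norm_num) (by omega) (by omega)]
    rw [stepA N s _ (t + 1) 2 (by norm_num) (by norm_num) (by omega) (by omega)]
    rw [stepA N s _ (t + 1) 3 (by norm_num) (by norm_num) (by omega) (by omega)]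
    rw [stepA N s _ (t + 1) 4 (by norm_num) (by norm_num) (by omega) (by omega)]
    rw [show ((1 : Int)).toNat = 1 from rfl, show ((2 : Int)).toNat = 2 from rfl,
      show ((3 : Int)).toNat = 3 from rfl, show ((4 : Int)).toNat = 4 from rfl]
    apply rmap_congr; intro k hk
    by_cases hki : k = t + 1
    · subst hki
      have m1 : ¬ (t + 1 - 1 = t + 1) := by omega
      have m2 : ¬ (t + 1 - 2 = t + 1) := by omega
      have m3 : ¬ (t + 1 - 3 = t + 1) := by omega
      have m4 : ¬ (t + 1 - 4 = t + 1) := by omega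
      have mt : ¬ (t + 1 ≤ t) := by omega
      simp only [if_neg m1, if_neg m2, if_neg m3, if_neg m4, if_neg mt, zero_add,
        eq_self_iff_true, if_true]
      have Tj_eq : ∀ j : ℕ, 1 ≤ j →
          (if j ≤ t + 1 ∧ pvEdge N s (t + 1 - j) (t + 1) = true
            then (if t + 1 - j ≤ t then pathC (pvEdge N s) 0 (t + 1 - j) else 0) else 0)
          = (if j ≤ t + 1 ∧ pvEdge N s (t + 1 - j) (t + 1) = true
              then pathC (pvEdge N s) 0 (t + 1 - j) else 0) := by
        intro j hj
        by_cases hc : j ≤ t + 1 ∧ pvEdge N s (t + 1 - j) (t + 1) = true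
        · rw [if_pos hc, if_pos hc, if_pos (by omega)]
        · rw [if_neg hc, if_neg hc]
      rw [Tj_eq 1 (by omega), Tj_eq 2 (by omega), Tj_eq 3 (by omega), Tj_eq 4 (by omega)]
      rw [if_pos (by omega : t + 1 ≤ t + 1)]
      rw [pathC_last (pvEdge N s) (t + 1) 0 (t + 1) (by omega) (by omega)]
      rw [sum_last4 (pvEdge N s) (pvEdge_far N s) _ (t + 1) (by omega)]
    · rw [if_neg hki, if_neg hki, if_neg hki, if_neg hki]
      have hiff : (k ≤ t + 1) = (k ≤ t) := propext (by constructor <;> omega)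
      simp only [hiff]

theorem initA (N : Int) (s : String) :
    PySem.List.pySetD (List.replicate (s.toList.length + 1) (0 : Int)) 0 1
      = (List.range (s.toList.length + 1)).map
          (fun k => if k ≤ 0 then pathC (pvEdge N s) 0 k else 0) := by
  have hset : PySem.List.pySetD (List.replicate (s.toList.length + 1) (0 : Int)) 0 1
      = (List.replicate (s.toList.length + 1) (0 : Int)).set 0 1 := by
    rw [PySem.List.pySetD_of_nonneg] <;> norm_num
  rw [hset]
  apply List.ext_getElem (by simp)
  intro i h1 h2
  simp only [List.getElem_set, List.getElem_replicate, List.getElem_map, List.getElem_range]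
  by_cases h0 : i = 0
  · subst h0; simp [pathC_self]
  · rw [if_neg (fun hh => h0 hh.symm), if_neg (by omega)]

-- ---------- B: the memoized recursion computes pathC ----------

-- memo invariant: every stored entry is a correct suffix count
def pvInv (N : Int) (s : String) (memo : PySem.Dict Int Int) : Prop :=
  ∀ (k v : Int), memo.get? k = some v →
    ∃ q : ℕ, k = (q : Int) ∧ q ≤ s.toList.length ∧ v = pathC (pvEdge N s) q s.toList.length

theorem pvWays_spec (N : Int) (s : String) :
    ∀ (fuel : ℕ) (memo : PySem.Dict Int Int) (p : ℕ),
      p ≤ s.toList.length → s.toList.length - p < fuel → pvInv N s memo →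
      (pvWays N s (s.toList.length : Int) fuel memo (p : Int)).1
          = pathC (pvEdge N s) p s.toList.length ∧
        pvInv N s (pvWays N s (s.toList.length : Int) fuel memo (p : Int)).2 := by
  intro fuel
  induction fuel with
  | zero => intro memo p hp hf _; omega
  | succ fuel ih =>
    intro memo p hp hf hInv
    by_cases hpn : p = s.toList.length
    · subst hpn
      rw [pvWays, if_pos rfl]
      exact ⟨(pathC_self _ _).symm, hInv⟩
    · have hplt : p < s.toList.length := by omega
      rw [pvWays, if_neg (by exact_mod_cast hpn)]
      cases hget : PySem.Dict.get? memo (p : Int) with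
      | some v =>
        obtain ⟨q, hq1, hq2, hq3⟩ := hInv _ _ hget
        have : q = p := by exact_mod_cast hq1.symm
        subst this
        exact ⟨hq3, hInv⟩
      | none =>
        -- one j step of the foldl
        have step : ∀ (acc : Int × PySem.Dict Int Int) (j : ℕ), 1 ≤ j → j ≤ 4 →
            pvInv N s acc.2 →
            ((if (p : Int) + (j : Int) ≤ (s.toList.length : Int) ∧
                  pvIsMaterial N (PySem.Str.slice s (some (p : Int))
                    (some ((p : Int) + (j : Int)))) = true then
                let q := pvWays N s (s.toList.length : Int) fuel acc.2 ((p : Int) + (j : Int));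
                (acc.1 + q.1, q.2)
              else acc).1
              = acc.1 + (if p + j ≤ s.toList.length ∧ pvEdge N s p (p + j) = true
                  then pathC (pvEdge N s) (p + j) s.toList.length else 0)) ∧
            pvInv N s
              ((if (p : Int) + (j : Int) ≤ (s.toList.length : Int) ∧
                  pvIsMaterial N (PySem.Str.slice s (some (p : Int))
                    (some ((p : Int) + (j : Int)))) = true then
                let q := pvWays N s (s.toList.length : Int) fuel acc.2 ((p : Int) + (j : Int));
                (acc.1 + q.1, q.2)
              else acc).2) := by
          intro acc j hj1 hj4 hacc
          have hcast : (p : Int) + (j : Int) = ((p + j : ℕ) : Int) := by push_cast; ring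
          by_cases hL : p + j ≤ s.toList.length
          · have hedge : pvEdge N s p (p + j)
                = pvIsMaterial N (PySem.Str.slice s (some (p : Int)) (some ((p + j : ℕ) : Int))) := by
              unfold pvEdge
              rw [decide_eq_true (show p < p + j by omega),
                  decide_eq_true (show p + j ≤ s.toList.length from hL),
                  decide_eq_true (show p + j - p ≤ 4 by omega)]
              simp
            by_cases hm : pvIsMaterial N
                (PySem.Str.slice s (some (p : Int)) (some ((p + j : ℕ) : Int))) = true
            · rw [hcast]
              rw [if_pos ⟨by exact_mod_cast hL, hm⟩]
              obtain ⟨hv, hi⟩ := ih acc.2 (p + j) hL (by omega) hacc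
              rw [if_pos ⟨hL, by rw [hedge]; exact hm⟩]
              exact ⟨by simp only [hv], hi⟩
            · rw [hcast, if_neg (fun hc => hm hc.2),
                if_neg (fun hc => hm (by rw [← hedge]; exact hc.2)), add_zero]
              exact ⟨rfl, hacc⟩
          · rw [hcast, if_neg (fun hc => hL (by exact_mod_cast hc.1)),
              if_neg (fun hc => hL hc.1), add_zero]
            exact ⟨rfl, hacc⟩
        simp only [List.foldl_cons, List.foldl_nil]
        set F := fun (acc : Int × PySem.Dict Int Int) (j : Int) =>
          if (p : Int) + j ≤ (s.toList.length : Int) ∧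
              pvIsMaterial N (PySem.Str.slice s (some (p : Int)) (some ((p : Int) + j))) = true then
            let q := pvWays N s (s.toList.length : Int) fuel acc.2 ((p : Int) + j);
            (acc.1 + q.1, q.2)
          else acc with hF
        have stepF : ∀ (acc : Int × PySem.Dict Int Int) (j : ℕ), 1 ≤ j → j ≤ 4 →
            pvInv N s acc.2 →
            (F acc ((j : ℕ) : Int)).1
              = acc.1 + (if p + j ≤ s.toList.length ∧ pvEdge N s p (p + j) = true
                  then pathC (pvEdge N s) (p + j) s.toList.length else 0) ∧
            pvInv N s (F acc ((j : ℕ) : Int)).2 := by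
          intro acc j hj1 hj4 hacc
          exact step acc j hj1 hj4 hacc
        have c1 : ((1 : ℕ) : Int) = (1 : Int) := by norm_num
        have c2 : ((2 : ℕ) : Int) = (2 : Int) := by norm_num
        have c3 : ((3 : ℕ) : Int) = (3 : Int) := by norm_num
        have c4 : ((4 : ℕ) : Int) = (4 : Int) := by norm_num
        obtain ⟨e1, i1⟩ := stepF (0, memo) 1 (by omega) (by omega) hInv
        rw [c1] at e1 i1
        obtain ⟨e2, i2⟩ := stepF (F (0, memo) 1) 2 (by omega) (by omega) i1
        rw [c2] at e2 i2
        obtain ⟨e3, i3⟩ := stepF (F (F (0, memo) 1) 2) 3 (by omega) (by omega) i2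
        rw [c3] at e3 i3
        obtain ⟨e4, i4⟩ := stepF (F (F (F (0, memo) 1) 2) 3) 4 (by omega) (by omega) i3
        rw [c4] at e4 i4
        have hval : (F (F (F (F (0, memo) 1) 2) 3) 4).1 = pathC (pvEdge N s) p s.toList.length := by
          rw [e4, e3, e2, e1, zero_add]
          rw [pathC_of_lt (pvEdge N s) hplt]
          rw [sum_first4 (pvEdge N s) (pvEdge_far N s)
            (fun b => pathC (pvEdge N s) b s.toList.length) p s.toList.length hplt]
        refine ⟨hval, ?_⟩
        intro k v hkv
        rw [PySem.Dict.get?_insert] at hkv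
        by_cases hkp : k = (p : Int)
        · rw [if_pos hkp] at hkv
          refine ⟨p, hkp, by omega, ?_⟩
          have : v = (F (F (F (F (0, memo) 1) 2) 3) 4).1 := by
            injection hkv.symm
          rw [this, hval]
        · rw [if_neg hkp] at hkv
          exact i4 k v hkv

theorem case_eq (N : Int) (s : String) : count_masks_case N s = count_masks_alt_case N s := by
  simp only [count_masks_case, count_masks_alt_case]
  rw [PySem.Str.len_eq]
  rw [show ((s.toList.length : Int) + 1).toNat = s.toList.length + 1 by omega]
  rw [initA N s]
  rw [PySem.List.pyRange_one 1 ((s.toList.length : Int) + 1)]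
  rw [show (((s.toList.length : Int) + 1) - 1).toNat = s.toList.length by omega]
  rw [List.foldl_map]
  beta_reduce
  rw [A_loop N s s.toList.length le_rfl]
  rw [getD_rmap _ _ _ (by omega : s.toList.length < s.toList.length + 1)]
  rw [if_pos (le_refl s.toList.length)]
  have hemp : pvInv N s PySem.Dict.empty := by
    intro k v hkv
    rw [PySem.Dict.get?_empty] at hkv
    exact absurd hkv (by simp)
  have := (pvWays_spec N s (s.toList.length + 1) PySem.Dict.empty 0 (by omega) (by omega) hemp).1
  rw [show ((0 : ℕ) : Int) = (0 : Int) by norm_num] at this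
  rw [this]

-- ===== VERDICT (by name: the statement is the Claim_ definition above) =====
theorem count_masks_spec : Claim_equal_count_masks := by
  intro test_cases _
  unfold Spec_count_masks count_masks count_masks_alt
  rw [PySem.List.foldl_append_singleton_eq_map, PySem.List.foldl_append_singleton_eq_map]
  exact List.map_congr_left (fun c _ => case_eq c.1 c.2)
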